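-- pv_equiv track=rewrite | github.com/MichielPerneel/spring_campaign_2023 | scripts/build_tx2gene_from_gff.py | parse_gff_attributes
-- ===== SOURCE A (Python) =====
-- def parse_gff_attributes(attr_field):
--     """
--     Parse the 9th GFF column (attributes) into a dict.
--     Attributes look like: key1=value1;key2=value2;...
--     """
--     out = {}
--     for kv in attr_field.strip().split(";"):
--         if not kv:
--             continue
--         if "=" in kv:
--             k, v = kv.split("=", 1)
--             out[k] = v
--     return out
-- ===== SOURCE B (Python) =====
-- import re
--
-- _PAIR = re.compile(r'(?:^|;)([^=;]*)=([^;]*)')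
--
-- def parse_gff_attributes(attr_field):
--     """
--     Parse the 9th GFF column (attributes) into a dict.
--     Attributes look like: key1=value1;key2=value2;...
--     """
--     return dict(_PAIR.findall(attr_field.strip()))
-- ===== Notes on version B (the rewrite author's own statement) =====
-- stated objective: idiomatic
-- what changed: Replaces the split-on-';' loop with per-segment split('=',1) by a single anchored-regex findall over the stripped field fed straight into dict().
import Mathlib
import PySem

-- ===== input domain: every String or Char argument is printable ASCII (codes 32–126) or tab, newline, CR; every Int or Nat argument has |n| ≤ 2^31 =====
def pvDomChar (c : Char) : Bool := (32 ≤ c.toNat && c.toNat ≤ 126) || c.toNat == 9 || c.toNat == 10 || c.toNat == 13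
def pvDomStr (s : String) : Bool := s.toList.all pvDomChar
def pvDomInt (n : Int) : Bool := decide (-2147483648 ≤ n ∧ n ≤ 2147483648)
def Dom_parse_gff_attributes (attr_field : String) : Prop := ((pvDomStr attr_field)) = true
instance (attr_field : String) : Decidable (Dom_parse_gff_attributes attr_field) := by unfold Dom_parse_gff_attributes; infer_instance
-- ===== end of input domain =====

-- B replaces A's split-on-';' / split-on-first-'=' loop by a single regex scan
-- (re.findall of (?:^|;)([^=;]*)=([^;]*)) fed into dict(); same output, more idiomatic.

-- ===== PORT A =====
-- strip / split(";") / "=" in kv / kv.split("=", 1) are ported with the exact PySem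
-- primitives; the dict is a PySem.Dict built in loop order, returned as its items.
def parse_gff_attributes (attr_field : String) : List (String × String) :=
  (((PySem.Chars.splitOn (PySem.Chars.strip attr_field.toList) [';']).foldl
      (fun (d : PySem.Dict String String) kv =>
        if kv.isEmpty then d            -- 'if not kv: continue'
        else if PySem.Chars.isIn ['='] kv then
          match PySem.Chars.splitOnMax kv ['='] 1 with  -- k, v = kv.split("=", 1)
          | [k, v] => d.insert (String.mk k) (String.mk v)
          | _ => d                       -- unreachable: with '=' in kv the split has 2 parts
        else d)
      PySem.Dict.empty)).items

-- ===== PORT B =====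
-- Hand port of re.findall(r'(?:^|;)([^=;]*)=([^;]*)', s): the regex is deterministic (the
-- key class excludes '=' and ';', the value class excludes ';'), so the scan below is exact:
-- try the '^'-anchored alternative at position 0, then at every position the ';' alternative
-- (failing at once on any other char); on failure advance one char, as the re engine does.
def pvTryMatch (cs : List Char) : Option (String × String × List Char) :=
  let key := cs.takeWhile (fun c => !(c == '=' || c == ';'))
  match cs.dropWhile (fun c => !(c == '=' || c == ';')) with
  | [] => none
  | c :: r =>
      if c = '=' then
        some (String.mk key, String.mk (r.takeWhile (fun c => c != ';')),
              r.dropWhile (fun c => c != ';'))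
      else none

theorem pvTryMatch_shrink (cs : List Char) (k v : String) (r : List Char)
    (h : pvTryMatch cs = some (k, v, r)) : r.length < cs.length := by
  unfold pvTryMatch at h
  split at h
  case h_1 => simp at h
  case h_2 a r₁ heq =>
    split at h
    · simp only [Option.some.injEq, Prod.mk.injEq] at h
      have hlen := List.length_dropWhile_le (fun c => !(c == '=' || c == ';')) cs
      rw [heq] at hlen
      simp only [List.length_cons] at hlen
      have h₂ : r.length ≤ r₁.length := by
        rcases h with ⟨-, -, hr⟩
        subst hr
        exact List.length_dropWhile_le _ _
      omega
    · simp at h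

-- the ';' alternative of the (?:^|;) anchor, tried at every position (fails at once off ';')
def pvScan : List Char → List (String × String)
  | [] => []
  | c :: rest =>
    if c = ';' then
      match hm : pvTryMatch rest with
      | some (k, v, r) => (k, v) :: pvScan r
      | none => pvScan rest
    else pvScan rest
termination_by cs => cs.length
decreasing_by
  · exact Nat.lt_trans (pvTryMatch_shrink rest k v r hm) (by simp)
  · simp
  · simp

-- the '^' alternative at position 0, then the scan over the rest of the string
def pvFindall (cs : List Char) : List (String × String) :=
  match pvTryMatch cs with
  | some (k, v, r) => (k, v) :: pvScan r
  | none => pvScan cs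

def parse_gff_attributes_alt (attr_field : String) : List (String × String) :=
  (PySem.Dict.ofList (pvFindall (PySem.Chars.strip attr_field.toList))).items

-- ===== PRECONDITION & SPEC =====
def Spec_parse_gff_attributes (attr_field : String) (out : List (String × String)) : Prop := out = parse_gff_attributes_alt attr_field
instance (attr_field : String) (out : List (String × String)) : Decidable (Spec_parse_gff_attributes attr_field out) := by unfold Spec_parse_gff_attributes; infer_instance

-- ===== CLAIM (what is proved, stated in full; the proofs are below) =====
def Claim_equal_parse_gff_attributes : Prop := ∀ (attr_field : String), Dom_parse_gff_attributes attr_field → Spec_parse_gff_attributes attr_field (parse_gff_attributes attr_field)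

-- ===== LEMMAS AND PROOFS =====

/-- Reference segmentation: split on ';' carrying the current (reversed) segment. -/
def pvSegs (cur : List Char) : List Char → List (List Char)
  | [] => [cur.reverse]
  | c :: rest => if c = ';' then cur.reverse :: pvSegs [] rest else pvSegs (c :: cur) rest

/-- What `pvSegs` does after the first ';'. -/
def pvTailSegs : List Char → List (List Char)
  | [] => []
  | _ :: r => pvSegs [] r

/-- The pair A extracts from one ';'-segment (none if the segment has no '='). -/
def pvSegToPair (seg : List Char) : Option (String × String) :=
  if '=' ∈ seg then
    some (String.mk (seg.takeWhile (· ≠ '=')), String.mk ((seg.dropWhile (· ≠ '=')).tail))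
  else none

theorem pvPredKey_true {c : Char} (h1 : c ≠ '=') (h2 : c ≠ ';') :
    (!(c == '=' || c == ';')) = true := by simp [h1, h2]

theorem pvKey_takeWhile (key : List Char) (hk : ∀ c ∈ key, c ≠ '=' ∧ c ≠ ';') :
    key.takeWhile (fun c => !(c == '=' || c == ';')) = key :=
  List.takeWhile_eq_self_iff.mpr (fun c hc => pvPredKey_true (hk c hc).1 (hk c hc).2)

theorem pvKey_dropWhile (key : List Char) (hk : ∀ c ∈ key, c ≠ '=' ∧ c ≠ ';') :
    key.dropWhile (fun c => !(c == '=' || c == ';')) = [] :=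
  List.dropWhile_eq_nil_iff.mpr (fun c hc => pvPredKey_true (hk c hc).1 (hk c hc).2)

theorem splitOn_go_eq_pvSegs (fuel : Nat) :
    ∀ (l cur : List Char) (acc : List (List Char)), l.length ≤ fuel →
      PySem.Chars.splitOn.go [';'] fuel l cur acc = acc.reverse ++ pvSegs cur l := by
  induction fuel with
  | zero =>
    intro l cur acc h
    have : l = [] := List.eq_nil_of_length_eq_zero (Nat.le_zero.mp h)
    subst this
    rw [PySem.Chars.splitOn.go]; simp [pvSegs]
  | succ n ih =>
    intro l cur acc h
    cases l with
    | nil =>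
      rw [PySem.Chars.splitOn.go]
      simp [pvSegs]
      omega
    | cons c rest =>
      rw [PySem.Chars.splitOn.go]
      by_cases hc : c = ';'
      · subst hc
        simp only [List.isPrefixOf, beq_self_eq_true, Bool.true_and, if_pos]
        rw [show List.drop [';'].length (';' :: rest) = rest from rfl]
        rw [ih rest [] (List.reverse cur :: acc) (by simpa using Nat.lt_succ_iff.mp (by simpa using h))]
        simp [pvSegs]
      · have hpre : ([';'].isPrefixOf (c :: rest)) = false := by
          simp [List.isPrefixOf]; exact fun hc' => (hc hc'.symm).elim
        rw [hpre]
        simp only [Bool.false_eq_true, if_neg, reduceCtorEq, not_false_eq_true]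
        rw [ih rest (c :: cur) acc (by simpa using Nat.lt_succ_iff.mp (by simpa using h))]
        simp [pvSegs, hc]
  
theorem splitOn_eq_pvSegs (l : List Char) :
    PySem.Chars.splitOn l [';'] = pvSegs [] l := by
  unfold PySem.Chars.splitOn
  rw [splitOn_go_eq_pvSegs (l.length + 1) l [] [] (Nat.le_succ _)]
  simp

theorem pvSegs_decomp : ∀ (l cur : List Char),
    pvSegs cur l = (cur.reverse ++ l.takeWhile (· ≠ ';')) :: pvTailSegs (l.dropWhile (· ≠ ';')) := by
  intro l
  induction l with
  | nil => intro cur; simp [pvSegs, pvTailSegs]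
  | cons c rest ih =>
    intro cur
    by_cases hc : c = ';'
    · subst hc; simp [pvSegs, pvTailSegs, List.takeWhile_cons, List.dropWhile_cons]
    · simp only [pvSegs, if_neg hc]
      rw [ih (c :: cur)]
      simp [List.takeWhile_cons, List.dropWhile_cons, hc]

/-- `splitOnMax.go` with budget 0 returns the rest as one piece. -/
theorem splitOnMax_go_zero (fuel : Nat) (l cur : List Char) (acc : List (List Char)) :
    PySem.Chars.splitOnMax.go ['='] fuel 0 l cur acc = acc.reverse ++ [cur.reverse ++ l] := by
  cases fuel with
  | zero => rw [PySem.Chars.splitOnMax.go]; simp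
  | succ n =>
    cases l with
    | nil =>
      rw [PySem.Chars.splitOnMax.go]; simp
      omega
    | cons c rest => rw [PySem.Chars.splitOnMax.go]; simp

theorem splitOnMax_go_one (fuel : Nat) :
    ∀ (l cur : List Char) (acc : List (List Char)), l.length ≤ fuel → '=' ∈ l →
      PySem.Chars.splitOnMax.go ['='] fuel 1 l cur acc =
        acc.reverse ++ [cur.reverse ++ l.takeWhile (· ≠ '='), (l.dropWhile (· ≠ '=')).tail] := by
  induction fuel with
  | zero =>
    intro l cur acc h hm
    have : l = [] := List.eq_nil_of_length_eq_zero (Nat.le_zero.mp h)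
    subst this; simp at hm
  | succ n ih =>
    intro l cur acc h hm
    cases l with
    | nil => simp at hm
    | cons c rest =>
      rw [PySem.Chars.splitOnMax.go]
      by_cases hc : c = '='
      · subst hc
        simp only [List.isPrefixOf, beq_self_eq_true, Bool.true_and, if_pos,
          OfNat.ofNat_ne_zero, if_neg, not_false_eq_true]
        rw [show List.drop ['='].length ('=' :: rest) = rest from rfl]
        rw [show (1 : Nat) - 1 = 0 from rfl]
        rw [splitOnMax_go_zero]
        simp [List.takeWhile_cons, List.dropWhile_cons]
      · have hpre : (['='].isPrefixOf (c :: rest)) = false := by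
          simp [List.isPrefixOf]; exact fun hc' => (hc hc'.symm).elim
        rw [if_neg (by omega : ¬ (1 : Nat) = 0), hpre]
        simp only [Bool.false_eq_true, if_neg, not_false_eq_true]
        have hm' : '=' ∈ rest := by
          rcases List.mem_cons.mp hm with h' | h'
          · exact (hc h'.symm).elim
          · exact h'
        rw [ih rest (c :: cur) acc (by simpa using Nat.lt_succ_iff.mp (by simpa using h)) hm']
        simp [List.takeWhile_cons, List.dropWhile_cons, hc]

theorem splitOnMax_eq_of_mem (kv : List Char) (hm : '=' ∈ kv) :
    PySem.Chars.splitOnMax kv ['='] 1 =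
      [kv.takeWhile (· ≠ '='), (kv.dropWhile (· ≠ '=')).tail] := by
  unfold PySem.Chars.splitOnMax
  rw [if_neg (by omega : ¬ (1 : Int) < 0)]
  have : ((1 : Int)).toNat = 1 := rfl
  rw [this, splitOnMax_go_one (kv.length + 1) kv [] [] (Nat.le_succ _) hm]
  simp

theorem isIn_eq_singleton (kv : List Char) : PySem.Chars.isIn ['='] kv = true ↔ '=' ∈ kv := by
  rw [PySem.Chars.isIn_iff_infix]
  constructor
  · intro h
    exact List.singleton_sublist.mp h.sublist
  · intro h
    rcases List.append_of_mem h with ⟨s, t, rfl⟩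
    exact ⟨s, t, by simp⟩

/-- A's loop body, applied segment by segment, equals inserting the extracted pairs. -/
theorem foldA_eq (segs : List (List Char)) : ∀ (d : PySem.Dict String String),
    segs.foldl
      (fun (d : PySem.Dict String String) kv =>
        if kv.isEmpty then d
        else if PySem.Chars.isIn ['='] kv then
          match PySem.Chars.splitOnMax kv ['='] 1 with
          | [k, v] => d.insert (String.mk k) (String.mk v)
          | _ => d
        else d) d
    = (segs.filterMap pvSegToPair).foldl (fun d p => d.insert p.1 p.2) d := by
  induction segs with
  | nil => intro d; simp
  | cons kv rest ih =>
    intro d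
    simp only [List.foldl_cons, List.filterMap_cons]
    by_cases hm : '=' ∈ kv
    · have hne : kv.isEmpty = false := by
        cases kv with
        | nil => simp at hm
        | cons a b => simp
      rw [hne, if_neg (by simp), if_pos ((isIn_eq_singleton kv).mpr hm),
        splitOnMax_eq_of_mem kv hm]
      simp only [pvSegToPair, if_pos hm, List.foldl_cons]
      exact ih _
    · by_cases hkv : kv.isEmpty
      · rw [if_pos hkv]
        simp only [pvSegToPair, if_neg hm]
        exact ih d
      · rw [if_neg hkv, if_neg (by
          intro hc
          exact hm ((isIn_eq_singleton kv).mp hc))]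
        simp only [pvSegToPair, if_neg hm]
        exact ih d

theorem pvScan_nil : pvScan [] = [] := by
  rw [pvScan.eq_def]

theorem pvScan_cons_ne (c : Char) (rest : List Char) (hc : c ≠ ';') :
    pvScan (c :: rest) = pvScan rest := by
  rw [pvScan.eq_def]
  simp [hc]

theorem pvScan_semi (r : List Char) : pvScan (';' :: r) = pvFindall r := by
  rw [pvScan.eq_def]
  unfold pvFindall
  simp only [reduceIte]
  split <;> simp_all

theorem pvScan_skip : ∀ (s r : List Char), (∀ c ∈ s, c ≠ ';') →
    pvScan (s ++ r) = pvScan r := by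
  intro s
  induction s with
  | nil => intro r _; simp
  | cons a s ih =>
    intro r hs
    rw [List.cons_append, pvScan_cons_ne a (s ++ r) (hs a (by simp))]
    exact ih r (fun c hc => hs c (by simp [hc]))

theorem dropWhile_head_semi : ∀ (l : List Char) (a : Char) (r : List Char),
    l.dropWhile (· ≠ ';') = a :: r → a = ';' := by
  intro l
  induction l with
  | nil => intro a r h; simp at h
  | cons c s ih =>
    intro a r h
    by_cases hc : c = ';'
    · subst hc
      simp [List.dropWhile_cons] at h
      exact h.1.symm
    · rw [List.dropWhile_cons, if_pos (by simpa using hc)] at h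
      exact ih a r h

theorem pvTryMatch_success (key rest : List Char) (hk : ∀ c ∈ key, c ≠ '=' ∧ c ≠ ';') :
    pvTryMatch (key ++ '=' :: rest) =
      some (String.mk key, String.mk (rest.takeWhile (fun c => c != ';')),
            rest.dropWhile (fun c => c != ';')) := by
  have htake : (key ++ '=' :: rest).takeWhile (fun c => !(c == '=' || c == ';')) = key := by
    rw [List.takeWhile_append]
    rw [if_pos (by rw [pvKey_takeWhile key hk]), List.takeWhile_cons]
    norm_num
  have hdrop : (key ++ '=' :: rest).dropWhile (fun c => !(c == '=' || c == ';')) = '=' :: rest := by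
    rw [List.dropWhile_append, pvKey_dropWhile key hk]
    norm_num
  unfold pvTryMatch
  rw [htake, hdrop]
  rfl

/-- `'=' ∈ s` puts `'='` at the head of `dropWhile (· ≠ '=')`. -/
theorem dropWhile_mem_head (s : List Char) (hm : '=' ∈ s) :
    s.dropWhile (· ≠ '=') = '=' :: (s.dropWhile (· ≠ '=')).tail := by
  induction s with
  | nil => simp at hm
  | cons a s ih =>
    by_cases ha : a = '='
    · subst ha; simp [List.dropWhile_cons]
    · have hm' : '=' ∈ s := by
        rcases List.mem_cons.mp hm with h | h
        · exact (ha h.symm).elim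
        · exact h
      simp only [List.dropWhile_cons, decide_eq_true_eq]
      rw [if_pos ha]
      exact ih hm'

theorem pvFindall_eq (n : Nat) : ∀ (l : List Char), l.length ≤ n →
    pvFindall l = (pvSegs [] l).filterMap pvSegToPair := by
  induction n with
  | zero =>
    intro l h
    have : l = [] := List.eq_nil_of_length_eq_zero (Nat.le_zero.mp h)
    subst this
    have h0 : pvTryMatch [] = none := rfl
    unfold pvFindall
    rw [h0, pvScan_nil]
    simp [pvSegs, pvSegToPair]
  | succ n ih =>
    intro l h
    rw [pvSegs_decomp]
    set s := l.takeWhile (· ≠ ';') with hs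
    set rst := l.dropWhile (· ≠ ';') with hrst
    have hsplit : l = s ++ rst := (List.takeWhile_append_dropWhile).symm
    have hs_no_semi : ∀ c ∈ s, c ≠ ';' := fun c hc => by
      have := List.mem_takeWhile_imp hc; simpa using this
    have hrst_shape : rst = [] ∨ ∃ r, rst = ';' :: r := by
      cases hh : rst with
      | nil => exact Or.inl rfl
      | cons a r =>
        right
        refine ⟨r, ?_⟩
        have ha : a = ';' := dropWhile_head_semi l a r (by rw [← hrst, hh])
        simp [hh, ha]
    have hlen_rst : rst.length ≤ l.length := hrst ▸ List.length_dropWhile_le _ _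
    have htail : pvScan rst = (pvTailSegs rst).filterMap pvSegToPair := by
      rcases hrst_shape with hh | ⟨r, hh⟩
      · rw [hh, pvScan_nil]; simp [pvTailSegs]
      · rw [hh, pvScan_semi]
        simp only [pvTailSegs]
        refine ih r ?_
        rw [hh] at hlen_rst; simp only [List.length_cons] at hlen_rst; omega
    by_cases hm : '=' ∈ s
    · -- the first segment contains '=': the anchored pair matches here
      have hds := dropWhile_mem_head s hm
      set key := s.takeWhile (· ≠ '=') with hkey
      set tl := (s.dropWhile (· ≠ '=')).tail with htl
      have hsdec : s = key ++ '=' :: tl := by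
        conv_lhs => rw [← List.takeWhile_append_dropWhile (p := (· ≠ '=')) (l := s)]
        rw [hds]
      have hkey_ok : ∀ c ∈ key, c ≠ '=' ∧ c ≠ ';' := fun c hc => by
        have h1 := List.mem_takeWhile_imp hc
        have h2 : c ∈ s := List.takeWhile_subset _ hc
        exact ⟨by simpa using h1, hs_no_semi c h2⟩
      have htl_no_semi : ∀ c ∈ tl, c ≠ ';' := fun c hc => by
        have : c ∈ s.dropWhile (· ≠ '=') := by
          rw [hds]; simp [hc]
        exact hs_no_semi c (List.dropWhile_subset _ this)
      have hl : l = key ++ '=' :: (tl ++ rst) := by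
        rw [hsplit, hsdec]; simp
      have htake_tl : (tl ++ rst).takeWhile (fun c => c != ';') = tl := by
        rw [List.takeWhile_append]
        have htw : (tl.takeWhile fun c => c != ';') = tl :=
          List.takeWhile_eq_self_iff.mpr (fun c hc => by simp [htl_no_semi c hc])
        by_cases hlen : (tl.takeWhile fun c => c != ';').length = tl.length
        · simp only [if_pos hlen, htw]
          rcases hrst_shape with hh | ⟨r, hh⟩
          · simp [hh]
          · simp [hh, List.takeWhile_cons]
        · exact absurd (by rw [htw]) hlen
      have hdrop_tl : (tl ++ rst).dropWhile (fun c => c != ';') = rst := by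
        rw [List.dropWhile_append]
        have : (tl.dropWhile fun c => c != ';') = [] := by
          rw [List.dropWhile_eq_nil_iff]
          intro c hc; simp [htl_no_semi c hc]
        simp only [this, List.isEmpty_nil, if_pos]
        rcases hrst_shape with hh | ⟨r, hh⟩
        · simp [hh]
        · simp [hh, List.dropWhile_cons]
      have hmatch : pvFindall l = (String.mk key, String.mk tl) :: pvScan rst := by
        have hsucc := pvTryMatch_success key (tl ++ rst) hkey_ok
        rw [htake_tl, hdrop_tl, ← hl] at hsucc
        unfold pvFindall
        rw [hsucc]
      rw [hmatch, htail]
      have hpair : pvSegToPair s = some (String.mk key, String.mk tl) := by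
        unfold pvSegToPair
        rw [if_pos hm, ← hkey, ← htl]
      simp [hpair]
    · -- no '=' in the first segment: both alternatives fail until the next ';'
      have hsfull : ∀ c ∈ s, c ≠ '=' ∧ c ≠ ';' :=
        fun c hc => ⟨fun h' => hm (h' ▸ hc), hs_no_semi c hc⟩
      have hnone : pvTryMatch l = none := by
        unfold pvTryMatch
        have hd : l.dropWhile (fun c => !(c == '=' || c == ';')) =
            rst.dropWhile (fun c => !(c == '=' || c == ';')) := by
          conv_lhs => rw [hsplit]
          rw [List.dropWhile_append, pvKey_dropWhile s hsfull]
          simp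
        rw [hd]
        rcases hrst_shape with hh | ⟨r, hh⟩
        · rw [hh]; simp
        · rw [hh, List.dropWhile_cons]
          simp
      have hskip : pvFindall l = pvScan rst := by
        unfold pvFindall
        rw [hnone]
        conv_lhs => rw [hsplit]
        exact pvScan_skip s rst hs_no_semi
      rw [hskip, htail]
      have hpair : pvSegToPair s = none := by simp [pvSegToPair, hm]
      simp [hpair]

-- ===== VERDICT (by name: the statement is the Claim_ definition above) =====
theorem parse_gff_attributes_spec : Claim_equal_parse_gff_attributes := by
  intro attr_field _
  unfold Spec_parse_gff_attributes parse_gff_attributes parse_gff_attributes_alt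
  rw [splitOn_eq_pvSegs, foldA_eq,
    pvFindall_eq (PySem.Chars.strip attr_field.toList).length _ (Nat.le_refl _)]
  rfl
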